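-- pv_equiv track=rewrite | github.com/daniel-reich/turbo-robot | pn7QpvW2fW9grvYYE_20.py | find_fulcrum
-- ===== SOURCE A (Python) =====
-- def find_fulcrum(lst):
--   x=1
--   while x < len(lst):
--     left=[]
--     right=[]
--     temp=0
--     while temp<x:
--       left.append(lst[temp])
--       temp+=1
--     temp=x+1
--     while temp<len(lst):
--       right.append(lst[temp])
--       temp+=1
--     if sum(left)==sum(right):
--       return lst[x]
--     x+=1
--     left
--   return -1
-- ===== SOURCE B (Python) =====
-- def find_fulcrum(lst):
--     total = sum(lst)
--     left = lst[0] if lst else 0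
--     for i in range(1, len(lst)):
--         if 2 * left == total - lst[i]:
--             return lst[i]
--         left += lst[i]
--     return -1
-- ===== Notes on version B (the rewrite author's own statement) =====
-- stated objective: faster
-- what changed: Replaces the O(n^2) rebuild of left/right sublists at every pivot with a single pass maintaining a running left prefix sum against the precomputed total.
import Mathlib
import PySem

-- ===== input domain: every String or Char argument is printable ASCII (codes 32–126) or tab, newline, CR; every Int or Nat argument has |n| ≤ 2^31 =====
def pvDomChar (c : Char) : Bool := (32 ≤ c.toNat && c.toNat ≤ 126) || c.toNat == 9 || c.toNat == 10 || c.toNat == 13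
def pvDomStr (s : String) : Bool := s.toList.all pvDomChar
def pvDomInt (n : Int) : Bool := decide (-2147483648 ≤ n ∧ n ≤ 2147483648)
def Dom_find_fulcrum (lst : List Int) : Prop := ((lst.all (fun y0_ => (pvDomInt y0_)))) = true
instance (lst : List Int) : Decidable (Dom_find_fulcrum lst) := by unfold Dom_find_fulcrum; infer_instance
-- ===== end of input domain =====

-- B replaces A's O(n^2) per-pivot rebuild of both sublists with one pass over a running prefix sum.

-- ===== PORT A =====
-- inner while loop: append lst[temp] while temp < stop (indices are always in range here)
def pvSeg (lst : List Int) (temp stop : Nat) (acc : List Int) : List Int :=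
  if temp < stop then pvSeg lst (temp + 1) stop (acc ++ [(PySem.List.pyGet? lst (temp : Int)).getD 0])
  else acc
termination_by stop - temp

-- outer while loop over the pivot x
def pvOuter (lst : List Int) (x : Nat) : Int :=
  if x < lst.length then
    let left := pvSeg lst 0 x []
    let right := pvSeg lst (x + 1) lst.length []
    if left.sum = right.sum then (PySem.List.pyGet? lst (x : Int)).getD 0
    else pvOuter lst (x + 1)
  else -1
termination_by lst.length - x

def find_fulcrum (lst : List Int) : Int := pvOuter lst 1

-- ===== PORT B =====
def pvAltLoop (lst : List Int) (i : Nat) (left total : Int) : Int :=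
  if h : i < lst.length then
    let v := lst[i]
    if 2 * left = total - v then v else pvAltLoop lst (i + 1) (left + v) total
  else -1
termination_by lst.length - i

def find_fulcrum_alt (lst : List Int) : Int :=
  pvAltLoop lst 1 (match lst with | [] => 0 | a :: _ => a) lst.sum

-- ===== PRECONDITION & SPEC =====
def Spec_find_fulcrum (lst : List Int) (out : Int) : Prop := out = find_fulcrum_alt lst
instance (lst : List Int) (out : Int) : Decidable (Spec_find_fulcrum lst out) := by unfold Spec_find_fulcrum; infer_instance

-- ===== CLAIM (what is proved, stated in full; the proofs are below) =====
def Claim_equal_find_fulcrum : Prop := ∀ (lst : List Int), Dom_find_fulcrum lst → Spec_find_fulcrum lst (find_fulcrum lst)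

-- ===== LEMMAS AND PROOFS =====

theorem pvSeg_eq (lst : List Int) (temp stop : Nat) (acc : List Int)
    (hs : stop ≤ lst.length) :
    pvSeg lst temp stop acc = acc ++ ((lst.drop temp).take (stop - temp)) := by
  by_cases h : temp < stop
  · rw [pvSeg, if_pos h, pvSeg_eq lst (temp + 1) stop _ hs]
    have hl : temp < lst.length := lt_of_lt_of_le h hs
    have hget : (PySem.List.pyGet? lst (temp : Int)).getD 0 = lst[temp] := by
      simp [PySem.List.pyGet?, PySem.List.pyIdx?, hl]
    rw [hget]
    have : (lst.drop temp).take (stop - temp)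
        = lst[temp] :: ((lst.drop (temp + 1)).take (stop - (temp + 1))) := by
      have hd : lst.drop temp = lst[temp] :: lst.drop (temp + 1) := by
        exact (List.drop_eq_getElem_cons hl)
      rw [hd]
      have : stop - temp = (stop - (temp + 1)) + 1 := by omega
      rw [this, List.take_succ_cons]
    rw [this]
    simp
  · rw [pvSeg, if_neg h]
    have : stop - temp = 0 := by omega
    simp [this]
termination_by stop - temp

theorem pvLoop_eq (lst : List Int) (x : Nat) (hx : 1 ≤ x) :
    pvOuter lst x = pvAltLoop lst x ((lst.take x).sum) lst.sum := by
  by_cases h : x < lst.length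
  · rw [pvOuter, if_pos h, pvAltLoop]
    rw [dif_pos h]
    rw [pvSeg_eq lst 0 x [] (le_of_lt h), pvSeg_eq lst (x + 1) lst.length [] le_rfl]
    have hget : (PySem.List.pyGet? lst (x : Int)).getD 0 = lst[x] := by
      simp [PySem.List.pyGet?, PySem.List.pyIdx?, h]
    have htot : lst.sum = (lst.take x).sum + lst[x] + (lst.drop (x + 1)).sum := by
      have hd : lst.drop x = lst[x] :: lst.drop (x + 1) := List.drop_eq_getElem_cons h
      have h1 : (lst.take x).sum + (lst.drop x).sum = lst.sum := by
        rw [← List.sum_append, List.take_append_drop]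
      rw [hd, List.sum_cons] at h1
      omega
    have hcond : (([] : List Int) ++ (lst.drop 0).take (x - 0)).sum = (([] : List Int) ++ (lst.drop (x + 1)).take (lst.length - (x + 1))).sum
        ↔ 2 * (lst.take x).sum = lst.sum - lst[x] := by
      simp [List.take_of_length_le (by simp : (lst.drop (x+1)).length ≤ lst.length - (x+1))]
      omega
    by_cases hc : 2 * (lst.take x).sum = lst.sum - lst[x]
    · rw [if_pos (hcond.mpr hc), if_pos hc, hget]
    · rw [if_neg (fun he => hc (hcond.mp he)), if_neg hc]
      rw [pvLoop_eq lst (x + 1) (by omega)]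
      have : (lst.take (x + 1)).sum = (lst.take x).sum + lst[x] := by
        rw [List.take_add_one, List.sum_append]
        simp [List.getElem?_eq_getElem h]
      rw [this]
  · rw [pvOuter, if_neg h, pvAltLoop, dif_neg h]
termination_by lst.length - x

-- ===== VERDICT (by name: the statement is the Claim_ definition above) =====
theorem find_fulcrum_spec : Claim_equal_find_fulcrum := by
  intro lst _
  unfold Spec_find_fulcrum find_fulcrum find_fulcrum_alt
  rw [pvLoop_eq lst 1 le_rfl]
  congr 1
  cases lst with
  | nil => simp
  | cons a t => simp
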